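-- pv_equiv track=rewrite | github.com/kyrolyte/pyfiles | file/file_pnt_paragraphjoin.py | collapse_paragraphs
-- ===== SOURCE A (Python) =====
-- def collapse_paragraphs(lines):
--     """
--     Accept a list of raw lines (with the trailing '\n' removed)
--     and return a new list of lines where paragraphs are collapsed.
--
--     Parameters
--     ----------
--     lines : list of str
--         Each line without the trailing newline character.
--
--     Returns
--     -------
--     list of str
--         The collapsed lines, ready to be joined with '\n'.
--     """
--     out_lines = []
--     buffer = ""
--
--     for raw in lines:
--         line = raw.rstrip()          # remove trailing whitespace
--
--         # 1. Blank line → paragraph break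
--         if line == "":
--             if buffer:
--                 out_lines.append(buffer)
--                 buffer = ""
--             out_lines.append("")     # keep the blank line
--             continue
--
--         # 2. Block quote or list item → new paragraph
--         if line.startswith(">") or line.startswith("*"):
--             if buffer:
--                 out_lines.append(buffer)
--                 buffer = ""
--             out_lines.append(line)
--             continue
--
--         # 3. Normal paragraph line → join to buffer
--         if buffer:
--             buffer += " " + line
--         else:
--             buffer = line
--
--     # flush the last paragraph if any
--     if buffer:
--         out_lines.append(buffer)
--
--     return out_lines
-- ===== SOURCE B (Python) =====
-- def collapse_paragraphs(lines):
--     out = []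
--     i = 0
--     n = len(lines)
--     while i < n:
--         line = lines[i].rstrip()
--         if line == "":
--             out.append("")
--             i += 1
--         elif line.startswith(">") or line.startswith("*"):
--             out.append(line)
--             i += 1
--         else:
--             run = [line]
--             i += 1
--             while i < n:
--                 nxt = lines[i].rstrip()
--                 if nxt == "" or nxt.startswith(">") or nxt.startswith("*"):
--                     break
--                 run.append(nxt)
--                 i += 1
--             out.append(" ".join(run))
--     return out
-- ===== Notes on version B (the rewrite author's own statement) =====
-- stated objective: alternative
-- what changed: Replaces A's carried string buffer with repeated '+= " " + line' concatenation and end-of-loop flush by a group-then-join pass: an index scans the lines, collects each maximal run of normal lines as a list and emits ' '.join(run), so no buffer state is threaded through the main loop.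
import Mathlib
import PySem

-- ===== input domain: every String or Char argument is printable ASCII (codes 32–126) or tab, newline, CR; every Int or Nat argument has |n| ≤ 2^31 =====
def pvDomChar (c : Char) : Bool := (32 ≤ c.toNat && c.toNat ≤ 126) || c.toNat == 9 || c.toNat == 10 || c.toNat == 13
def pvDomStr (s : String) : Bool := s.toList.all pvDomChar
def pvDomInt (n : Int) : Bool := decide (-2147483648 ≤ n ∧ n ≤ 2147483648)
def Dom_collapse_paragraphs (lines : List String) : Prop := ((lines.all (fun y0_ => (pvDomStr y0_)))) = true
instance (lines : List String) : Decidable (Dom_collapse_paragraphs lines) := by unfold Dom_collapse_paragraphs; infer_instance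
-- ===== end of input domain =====

-- B is an alternative decomposition (group-then-join over maximal runs instead of a carried
-- buffer with flushes); return value proved equal to A's on all inputs.

-- ===== PORT A =====
-- one step of A's for-loop over (out_lines, buffer)
def pvAStep (s : List String × String) (raw : String) : List String × String :=
  let line := PySem.Str.rstrip raw
  if line == "" then
    ((if s.2 == "" then s.1 else s.1 ++ [s.2]) ++ [""], "")
  else if PySem.Str.startswith line ">" || PySem.Str.startswith line "*" then
    ((if s.2 == "" then s.1 else s.1 ++ [s.2]) ++ [line], "")
  else
    (s.1, if s.2 == "" then line else s.2 ++ " " ++ line)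

def collapse_paragraphs (lines : List String) : List String :=
  let st := lines.foldl pvAStep ([], "")
  if st.2 == "" then st.1 else st.1 ++ [st.2]

-- ===== PORT B =====
-- a line that breaks a paragraph run: blank after rstrip, or a quote/list line
def pvBreak (line : String) : Bool :=
  line == "" || PySem.Str.startswith line ">" || PySem.Str.startswith line "*"

-- B's inner while-loop: collect the rstripped run of non-breaking lines, return the rest
def pvTakeRun : List String → List String × List String
  | [] => ([], [])
  | l :: rest =>
    let line := PySem.Str.rstrip l
    if pvBreak line then ([], l :: rest)
    else
      let p := pvTakeRun rest
      (line :: p.1, p.2)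

theorem pvTakeRun_len : ∀ (xs : List String), (pvTakeRun xs).2.length ≤ xs.length
  | [] => Nat.le_refl _
  | l :: rest => by
    simp only [pvTakeRun]
    split
    · simp
    · exact Nat.le_succ_of_le (pvTakeRun_len rest)

-- " ".join(run) on a nonempty run, as Source B's join computes it
def pvJoinSp : List String → String
  | [] => ""
  | h :: t => t.foldl (fun acc x => acc ++ " " ++ x) h

-- B's outer while-loop
def pvBGo : List String → List String
  | [] => []
  | l :: rest =>
    let line := PySem.Str.rstrip l
    if line == "" then "" :: pvBGo rest
    else if PySem.Str.startswith line ">" || PySem.Str.startswith line "*" then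
      line :: pvBGo rest
    else
      let p := pvTakeRun rest
      pvJoinSp (line :: p.1) :: pvBGo p.2
termination_by xs => xs.length
decreasing_by
  · simp
  · simp
  · exact Nat.lt_succ_of_le (pvTakeRun_len rest)

def collapse_paragraphs_alt (lines : List String) : List String := pvBGo lines

-- ===== PRECONDITION & SPEC =====
def Spec_collapse_paragraphs (lines : List String) (out : List String) : Prop := out = collapse_paragraphs_alt lines
instance (lines : List String) (out : List String) : Decidable (Spec_collapse_paragraphs lines out) := by unfold Spec_collapse_paragraphs; infer_instance

-- ===== CLAIM (what is proved, stated in full; the proofs are below) =====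
def Claim_equal_collapse_paragraphs : Prop := ∀ (lines : List String), Dom_collapse_paragraphs lines → Spec_collapse_paragraphs lines (collapse_paragraphs lines)

-- ===== LEMMAS AND PROOFS =====

-- A's final flush of the buffer
def pvAFlush (s : List String × String) : List String :=
  if s.2 == "" then s.1 else s.1 ++ [s.2]

-- result of B when a paragraph has already started with accumulated buffer `buf`
def pvBMerge (buf : String) (lines : List String) : List String :=
  let p := pvTakeRun lines
  pvJoinSp (buf :: p.1) :: pvBGo p.2

theorem pvJoinSp_cons_cons (a b : String) (t : List String) :
    pvJoinSp (a :: b :: t) = pvJoinSp ((a ++ " " ++ b) :: t) := rfl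

theorem pvLoop_eq : ∀ (lines : List String) (out : List String) (buf : String),
    pvAFlush (lines.foldl pvAStep (out, buf)) =
    out ++ (if buf = "" then pvBGo lines else pvBMerge buf lines) := by
  intro lines
  induction lines with
  | nil =>
    intro out buf
    by_cases h : buf = ""
    · simp [pvAFlush, h, pvBGo]
    · simp [pvAFlush, h, pvBMerge, pvTakeRun, pvJoinSp, pvBGo]
  | cons l rest ih =>
    intro out buf
    rw [List.foldl_cons]
    by_cases hb : PySem.Str.rstrip l = ""
    · by_cases h : buf = ""
      · have hstep : pvAStep (out, buf) l = (out ++ [""], "") := by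
          simp [pvAStep, hb, h]
        rw [hstep, ih]
        simp [h, pvBGo, hb]
      · have hstep : pvAStep (out, buf) l = (out ++ [buf] ++ [""], "") := by
          simp [pvAStep, hb, h]
        rw [hstep, ih]
        simp [h, pvBMerge, pvTakeRun, pvBreak, pvJoinSp, pvBGo, hb]
    · by_cases hq : (PySem.Chars.startswith (PySem.Chars.rstrip l.toList) ['>'] = true ∨
                     PySem.Chars.startswith (PySem.Chars.rstrip l.toList) ['*'] = true)
      · have hB : pvBreak (PySem.Str.rstrip l) = true := by
          simp [pvBreak, hb]; tauto
        rcases hq with h1 | h1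
        all_goals by_cases h : buf = ""
        · have hstep : pvAStep (out, buf) l = (out ++ [PySem.Str.rstrip l], "") := by
            simp [pvAStep, hb, h, h1]
          rw [hstep, ih]
          simp [h, pvBGo, hb, h1]
        · have hstep : pvAStep (out, buf) l = (out ++ [buf] ++ [PySem.Str.rstrip l], "") := by
            simp [pvAStep, hb, h, h1]
          rw [hstep, ih]
          simp [h, pvBMerge, pvTakeRun, hB, pvJoinSp, pvBGo, hb, h1]
        · have hstep : pvAStep (out, buf) l = (out ++ [PySem.Str.rstrip l], "") := by
            simp [pvAStep, hb, h, h1]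
          rw [hstep, ih]
          simp [h, pvBGo, hb, h1]
        · have hstep : pvAStep (out, buf) l = (out ++ [buf] ++ [PySem.Str.rstrip l], "") := by
            simp [pvAStep, hb, h, h1]
          rw [hstep, ih]
          simp [h, pvBMerge, pvTakeRun, hB, pvJoinSp, pvBGo, hb, h1]
      · obtain ⟨h1, h2⟩ := not_or.mp hq
        have hB : pvBreak (PySem.Str.rstrip l) = false := by
          simp [pvBreak, hb, h1, h2]
        by_cases h : buf = ""
        · have hstep : pvAStep (out, buf) l = (out, PySem.Str.rstrip l) := by
            simp [pvAStep, hb, h, h1, h2]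
          rw [hstep, ih]
          simp [h, hb, pvBGo, h1, h2, pvBMerge]
        · have hne : buf ++ " " ++ PySem.Str.rstrip l ≠ "" := by
            intro hcon
            have : (buf ++ " " ++ PySem.Str.rstrip l).length = 0 := by rw [hcon]; rfl
            simp [String.length_append] at this
          have hstep : pvAStep (out, buf) l = (out, buf ++ " " ++ PySem.Str.rstrip l) := by
            simp [pvAStep, hb, h, h1, h2]
          rw [hstep, ih]
          rw [if_neg hne, if_neg h]
          simp only [pvBMerge, pvTakeRun, hB, Bool.false_eq_true, if_neg (by simp : ¬False)]
          simp [pvJoinSp_cons_cons]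

-- ===== VERDICT (by name: the statement is the Claim_ definition above) =====
theorem collapse_paragraphs_spec : Claim_equal_collapse_paragraphs := by
  intro lines _
  show collapse_paragraphs lines = collapse_paragraphs_alt lines
  have := pvLoop_eq lines [] ""
  simpa [pvAFlush, collapse_paragraphs, collapse_paragraphs_alt] using this
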